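-- pv_equiv track=rewrite | github.com/edwardzhu/checkio-solution | EmpireOfCode/common/Crystalite Farms/structurePattern.py | check_structure
-- ===== SOURCE A (Python) =====
-- def check_structure(pattern, structure, pattern_level=2):
--     flag = convert(pattern, pattern_level)
--     s = list(structure[::-1])
--     if len(flag) > len(s):
--         return False
--     result = True
--     for i in range(len(s)):
--         if i >= len(flag):
--             result &= match(0, s[i], pattern_level)
--         else:
--             result &= match(flag[i], s[i], pattern_level)
--     return result
--
-- def convert(pattern, level):
--     d = pattern
--     result = []
--     while d > 0:
--         result.append(d % level)
--         d = d // level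
--     return result
--
-- def match(flag, c, level):
--     return (flag == 0 and 47 < ord(c) < 58) or (level == 2 and flag == 1 and 64 < ord(c.upper()) < 91) or (level > 2 and flag == 1 and 96 < ord(c) < 123) or (level > 2 and flag == 2 and 64 < ord(c) < 91) or (flag == 3 and c == " ")
-- ===== SOURCE B (Python) =====
-- def check_structure(pattern, structure, pattern_level=2):
--     # Fused single pass: walk the structure from its least-significant (right) end,
--     # peeling base-pattern_level digits off a running remainder instead of
--     # building the digit list first.
--     rem = pattern
--     ok = True
--     for c in reversed(structure):
--         digit = rem % pattern_level if rem > 0 else 0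
--         if rem > 0:
--             rem //= pattern_level
--         ok &= match(digit, c, pattern_level)
--     return False if rem > 0 else ok
--
-- def match(flag, c, level):
--     return (flag == 0 and 47 < ord(c) < 58) or (level == 2 and flag == 1 and 64 < ord(c.upper()) < 91) or (level > 2 and flag == 1 and 96 < ord(c) < 123) or (level > 2 and flag == 2 and 64 < ord(c) < 91) or (flag == 3 and c == " ")
-- ===== Notes on version B (the rewrite author's own statement) =====
-- stated objective: simpler
-- what changed: B drops the separate convert() digit-list and the pre-loop length check, fusing base-level digit extraction into a single pass over the reversed structure with a running remainder, returning False after the loop if the pattern was not fully consumed.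
import Mathlib
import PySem

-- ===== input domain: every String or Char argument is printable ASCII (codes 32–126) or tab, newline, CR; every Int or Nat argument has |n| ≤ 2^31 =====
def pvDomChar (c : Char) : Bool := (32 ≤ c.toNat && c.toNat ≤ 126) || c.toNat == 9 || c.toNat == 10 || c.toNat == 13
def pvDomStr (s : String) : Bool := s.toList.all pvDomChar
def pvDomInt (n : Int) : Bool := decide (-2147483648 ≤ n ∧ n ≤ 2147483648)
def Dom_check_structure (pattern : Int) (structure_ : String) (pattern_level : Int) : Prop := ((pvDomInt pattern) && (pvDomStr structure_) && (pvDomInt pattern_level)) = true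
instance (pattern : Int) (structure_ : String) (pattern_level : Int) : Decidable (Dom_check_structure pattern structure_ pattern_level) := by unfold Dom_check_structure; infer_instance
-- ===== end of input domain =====

-- B fuses A's separate digit-list construction (`convert`) into a single pass over the
-- structure, maintaining a running remainder; objective: simpler (one loop, no list).


-- ===== PORT A =====
-- ord(c.upper()) for a single char: exact on the ASCII domain (Dom guarantees ASCII)
def pyOrdUpper (c : Char) : Int :=
  if 97 ≤ (c.toNat : Int) ∧ (c.toNat : Int) ≤ 122 then (c.toNat : Int) - 32 else (c.toNat : Int)

-- the `match` helper (identical in both Python files)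
def pymatch (flag : Int) (c : Char) (level : Int) : Bool :=
  (flag == 0 && (47 < (c.toNat : Int) && (c.toNat : Int) < 58)) ||
  (level == 2 && flag == 1 && (64 < pyOrdUpper c && pyOrdUpper c < 91)) ||
  (level > 2 && flag == 1 && (96 < (c.toNat : Int) && (c.toNat : Int) < 123)) ||
  (level > 2 && flag == 2 && (64 < (c.toNat : Int) && (c.toNat : Int) < 91)) ||
  (flag == 3 && c == ' ')

-- convert's `while d > 0` loop, with fuel d.toNat + 1, which suffices on every input
-- on which the Python loop terminates (Pre_ excludes the rest)
def convertAux (lv : Int) : Nat → Int → List Int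
  | 0, _ => []
  | fuel+1, d =>
    if 0 < d then PySem.Int.mod d lv :: convertAux lv fuel (PySem.Int.floordiv d lv) else []

def convert (pattern level : Int) : List Int := convertAux level (pattern.toNat + 1) pattern

def check_structure (pattern : Int) (structure_ : String) (pattern_level : Int) : Bool :=
  let flag := convert pattern pattern_level
  let s := structure_.toList.reverse          -- list(structure[::-1])
  if flag.length > s.length then false
  else
    (List.range s.length).foldl (fun (result : Bool) (i : Nat) =>
      if (flag.length : Int) ≤ (i : Int) then result && pymatch 0 (s.getD i ' ') pattern_level
      else result && pymatch (flag.getD i 0) (s.getD i ' ') pattern_level) true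

-- ===== PORT B =====
-- one loop iteration of B: peel one base-`lv` digit off the running remainder and AND the match in
def bstep (lv : Int) (st : Int × Bool) (c : Char) : Int × Bool :=
  let digit := if 0 < st.1 then PySem.Int.mod st.1 lv else 0
  let rem := if 0 < st.1 then PySem.Int.floordiv st.1 lv else st.1
  (rem, st.2 && pymatch digit c lv)

def check_structure_alt (pattern : Int) (structure_ : String) (pattern_level : Int) : Bool :=
  let st := structure_.toList.reverse.foldl (bstep pattern_level) (pattern, true)
  if 0 < st.1 then false else st.2

-- ===== PRECONDITION & SPEC =====
-- Pre_ excludes only inputs where A does not return: pattern > 0 with pattern_level = 0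
-- (ZeroDivisionError in convert) or pattern_level = 1 (convert's loop never terminates).
def Pre_check_structure (pattern : Int) (structure_ : String) (pattern_level : Int) : Prop :=
  pattern ≤ 0 ∨ 2 ≤ pattern_level ∨ pattern_level ≤ -1
instance (pattern : Int) (structure_ : String) (pattern_level : Int) : Decidable (Pre_check_structure pattern structure_ pattern_level) := by unfold Pre_check_structure; infer_instance

def pvWitness_check_structure : Int × String × Int := (6, "a0", 2)

def Spec_check_structure (pattern : Int) (structure_ : String) (pattern_level : Int) (out : Bool) : Prop := out = check_structure_alt pattern structure_ pattern_level
instance (pattern : Int) (structure_ : String) (pattern_level : Int) (out : Bool) : Decidable (Spec_check_structure pattern structure_ pattern_level out) := by unfold Spec_check_structure; infer_instance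

-- ===== CLAIM (what is proved, stated in full; the proofs are below) =====
def Claim_equal_check_structure : Prop := ∀ (pattern : Int) (structure_ : String) (pattern_level : Int), Dom_check_structure pattern structure_ pattern_level → Pre_check_structure pattern structure_ pattern_level → Spec_check_structure pattern structure_ pattern_level (check_structure pattern structure_ pattern_level)

-- ===== LEMMAS AND PROOFS =====

-- termination condition of convert's loop (= Pre_, ignoring the string)
def Trm (d lv : Int) : Prop := d ≤ 0 ∨ 2 ≤ lv ∨ lv ≤ -1

-- the remainder update of one B iteration
def stepFn (lv d : Int) : Int := if 0 < d then PySem.Int.floordiv d lv else d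

-- B's remainder after n iterations
def remN (lv : Int) : Int → Nat → Int
  | d, 0 => d
  | d, n+1 => remN lv (stepFn lv d) n

lemma trm_step (lv d : Int) (h : Trm d lv) : Trm (stepFn lv d) lv := by
  unfold Trm stepFn at *
  by_cases hd : 0 < d
  · rcases h with h | h | h
    · omega
    · exact Or.inr (Or.inl h)
    · exact Or.inr (Or.inr h)
  · simp [hd]; omega

lemma step_lt (lv d : Int) (hd : 0 < d) (hlv : 2 ≤ lv) :
    0 ≤ PySem.Int.floordiv d lv ∧ PySem.Int.floordiv d lv < d := by
  rw [PySem.Int.floordiv_eq_ediv_of_pos (by omega)]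
  refine ⟨Int.ediv_nonneg (by omega) (by omega), ?_⟩
  rw [Int.ediv_lt_iff_lt_mul (by omega)]
  nlinarith

lemma step_nonpos (lv d : Int) (hd : 0 < d) (hlv : lv ≤ -1) :
    PySem.Int.floordiv d lv ≤ 0 := by
  have := Int.fdiv_nonpos_of_nonneg_of_nonpos (a := d) (b := lv) (by omega) (by omega)
  simpa [PySem.Int.floordiv] using this

lemma convertAux_nonpos (lv : Int) (f : Nat) (d : Int) (h : d ≤ 0) :
    convertAux lv f d = [] := by
  cases f <;> simp [convertAux] <;> omega

lemma convertAux_stable (lv : Int) : ∀ (f : Nat) (d : Int), Trm d lv → d.toNat < f →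
    convertAux lv f d = convertAux lv (d.toNat + 1) d := by
  intro f
  induction f using Nat.strong_induction_on with
  | _ f ih =>
    intro d hT hf
    by_cases hd : 0 < d
    · rcases f with _ | f'
      · omega
      have ht : d.toNat ≥ 1 := by omega
      rcases hT with h | h | h
      · omega
      · -- 2 ≤ lv
        obtain ⟨h0, hlt⟩ := step_lt lv d hd h
        have hTn : Trm (PySem.Int.floordiv d lv) lv := Or.inr (Or.inl h)
        simp only [convertAux, if_pos hd]
        rw [ih f' (by omega) _ hTn (by omega),
            ih d.toNat (by omega) _ hTn (by omega)]
      · -- lv ≤ -1 : the new remainder is ≤ 0, both recursive calls give []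
        have h0 := step_nonpos lv d hd h
        simp only [convertAux, if_pos hd]
        rw [convertAux_nonpos lv f' _ h0, convertAux_nonpos lv d.toNat _ h0]
    · rw [convertAux_nonpos lv _ _ (by omega), convertAux_nonpos lv _ _ (by omega)]

lemma convert_unfold (d lv : Int) (hT : Trm d lv) :
    convert d lv = if 0 < d then PySem.Int.mod d lv :: convert (PySem.Int.floordiv d lv) lv else [] := by
  by_cases hd : 0 < d
  · rw [if_pos hd]
    have ht : d.toNat ≥ 1 := by omega
    have hstep : convertAux lv d.toNat (PySem.Int.floordiv d lv)
        = convert (PySem.Int.floordiv d lv) lv := by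
      rcases hT with h | h | h
      · omega
      · obtain ⟨h0, hlt⟩ := step_lt lv d hd h
        exact convertAux_stable lv d.toNat _ (Or.inr (Or.inl h)) (by omega)
      · have h0 := step_nonpos lv d hd h
        rw [convertAux_nonpos lv d.toNat _ h0]
        unfold convert
        rw [convertAux_nonpos lv _ _ h0]
    rw [← hstep]
    simp only [convert, convertAux, if_pos hd]
  · rw [if_neg hd]
    simp only [convert]
    exact convertAux_nonpos lv _ _ (by omega)

-- digit 0 of the running remainder is convert's digit 0
lemma dig_head (d lv : Int) (hT : Trm d lv) :
    (if 0 < d then PySem.Int.mod d lv else 0) = (convert d lv).getD 0 0 := by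
  rw [convert_unfold d lv hT]
  by_cases hd : 0 < d <;> simp [hd]

-- shifting one digit: convert of the stepped remainder is convert's tail
lemma dig_shift (d lv : Int) (i : Nat) (hT : Trm d lv) :
    (convert (stepFn lv d) lv).getD i 0 = (convert d lv).getD (i+1) 0 := by
  by_cases hd : 0 < d
  · rw [convert_unfold d lv hT]
    simp [stepFn, hd]
  · have hnil : convert d lv = [] := by rw [convert_unfold d lv hT]; simp [hd]
    have hstep : stepFn lv d = d := by simp [stepFn, hd]
    rw [hstep, hnil]
    simp

lemma convert_len_pos (d lv : Int) (hT : Trm d lv) :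
    0 < (convert d lv).length ↔ 0 < d := by
  rw [convert_unfold d lv hT]
  by_cases hd : 0 < d <;> simp [hd]

lemma remN_pos_iff (lv : Int) : ∀ (n : Nat) (d : Int), Trm d lv →
    (0 < remN lv d n ↔ n < (convert d lv).length) := by
  intro n
  induction n with
  | zero => intro d hT; simpa [remN] using (convert_len_pos d lv hT).symm
  | succ n ih =>
    intro d hT
    have h := ih _ (trm_step lv d hT)
    rw [show remN lv d (n+1) = remN lv (stepFn lv d) n from rfl, h]
    by_cases hd : 0 < d
    · rw [convert_unfold d lv hT]
      simp [stepFn, hd]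
    · have hnil : convert d lv = [] := by rw [convert_unfold d lv hT]; simp [hd]
      have hstep : stepFn lv d = d := by simp [stepFn, hd]
      rw [hstep, hnil]
      simp

-- B's fold, characterised: final remainder and the AND of all per-position matches
lemma bfold_eq (lv : Int) : ∀ (s : List Char) (d : Int) (ok : Bool), Trm d lv →
    s.foldl (bstep lv) (d, ok) =
      (remN lv d s.length,
       ok && (List.range s.length).all
         (fun i => pymatch ((convert d lv).getD i 0) (s.getD i ' ') lv)) := by
  intro s
  induction s with
  | nil => intro d ok hT; simp [remN]
  | cons c s' ih =>
    intro d ok hT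
    have hstep : bstep lv (d, ok) c =
        (stepFn lv d, ok && pymatch ((convert d lv).getD 0 0) c lv) := by
      simp only [bstep, stepFn, dig_head d lv hT]
    rw [List.foldl_cons, hstep, ih _ _ (trm_step lv d hT)]
    have hshift : ∀ i : Nat,
        (convert (stepFn lv d) lv).getD i 0 = (convert d lv).getD (i+1) 0 :=
      fun i => dig_shift d lv i hT
    simp only [List.length_cons, List.range_succ_eq_map, List.all_cons, List.all_map,
      Function.comp_def, hshift, List.getD_cons_succ, List.getD_cons_zero, remN]
    rw [Bool.and_assoc]

-- A's fold: an accumulating && starting from acc is acc && all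
lemma foldl_and_all (f : Nat → Bool) : ∀ (l : List Nat) (acc : Bool),
    l.foldl (fun r i => r && f i) acc = (acc && l.all f) := by
  intro l
  induction l with
  | nil => intro acc; simp
  | cons x l' ih => intro acc; simp [List.foldl_cons, ih, Bool.and_assoc]

-- the two branches of A's loop body compute the same value
lemma branch_merge (flag : List Int) (s : List Char) (lv : Int) :
    (fun (result : Bool) (i : Nat) =>
      if (flag.length : Int) ≤ (i : Int) then result && pymatch 0 (s.getD i ' ') lv
      else result && pymatch (flag.getD i 0) (s.getD i ' ') lv) =
    (fun result i => result && pymatch (flag.getD i 0) (s.getD i ' ') lv) := by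
  funext result i
  split_ifs with h
  · have : flag.length ≤ i := by exact_mod_cast h
    rw [List.getD_eq_default _ _ this]
  · rfl

-- ===== VERDICT (by name: the statement is the Claim_ definition above) =====
theorem check_structure_spec : Claim_equal_check_structure := by
  intro pattern structure_ lv _ hPre
  unfold Spec_check_structure check_structure check_structure_alt
  have hT : Trm pattern lv := hPre
  set s := structure_.toList.reverse with hs
  rw [bfold_eq lv s pattern true hT]
  simp only
  rw [branch_merge (convert pattern lv) s lv, foldl_and_all _ (List.range s.length) true]
  have hpos := remN_pos_iff lv s.length pattern hT
  by_cases hlen : (convert pattern lv).length > s.length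
  · rw [if_pos hlen, if_pos (hpos.mpr (by simpa using hlen))]
  · rw [if_neg hlen, if_neg (by rw [hpos]; omega)]
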